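-- pv_equiv track=rewrite | github.com/MattHeard/EsimateDiskExhaustion | estimate.py | calcExhaustion
-- ===== SOURCE A (Python) =====
-- def calcExhaustion(disk, procRates):
--     """Calculate how many seconds before the disk is filled.
--
--        procRates lists the rates at which each process fills 1 byte of disk
--        space."""
--     eta = 0;
--     while disk > 0:
--         eta += 1
--         for rate in procRates:
--             if eta % rate == 0:
--                 disk -= 1
--     return eta
-- ===== SOURCE B (Python) =====
-- def calcExhaustion(disk, procRates):
--     """Calculate how many seconds before the disk is filled.
--
--        Binary search: the answer is the smallest T >= 1 such that the total
--        number of bytes written by time T, sum(T // abs(r)), reaches disk."""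
--     if disk <= 0:
--         return 0
--
--     def filled(t):
--         return sum(t // abs(r) for r in procRates)
--
--     hi = 1
--     while filled(hi) < disk:
--         hi *= 2
--     lo = 1
--     while lo < hi:
--         mid = (lo + hi) // 2
--         if filled(mid) >= disk:
--             hi = mid
--         else:
--             lo = mid + 1
--     return lo
-- ===== Notes on version B (the rewrite author's own statement) =====
-- stated objective: faster
-- what changed: Replaces A's second-by-second simulation of the disk filling with a binary search for the smallest T such that sum(T // abs(rate)) reaches the disk size, after doubling an upper bound.
import Mathlib
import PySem

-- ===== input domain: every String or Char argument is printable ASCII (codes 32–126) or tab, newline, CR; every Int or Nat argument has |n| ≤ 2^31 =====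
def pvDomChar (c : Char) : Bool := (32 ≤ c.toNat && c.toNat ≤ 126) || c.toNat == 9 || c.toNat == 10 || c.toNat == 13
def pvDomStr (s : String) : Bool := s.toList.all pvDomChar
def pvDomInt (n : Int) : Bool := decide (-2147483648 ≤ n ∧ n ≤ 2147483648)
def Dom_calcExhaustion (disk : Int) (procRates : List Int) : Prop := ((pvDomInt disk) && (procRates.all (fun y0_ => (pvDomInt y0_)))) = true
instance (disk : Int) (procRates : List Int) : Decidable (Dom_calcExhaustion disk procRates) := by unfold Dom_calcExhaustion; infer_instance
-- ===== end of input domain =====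

-- B replaces A's second-by-second simulation by a binary search (with a doubling
-- phase) for the smallest T with sum(T // abs(r)) >= disk; objective: faster.

-- ===== PORT A =====
-- fuel guard only (the Python while-loop is unbounded); under Pre_ the fuel is
-- never exhausted, so the loop is a literal transcription of A.
def pvFuel (disk : Int) (rates : List Int) : Nat :=
  (disk * rates.foldl (fun a r => max a |r|) 1).toNat + 1

-- inner 'for rate in procRates: if eta % rate == 0: disk -= 1'
def pvInnerA (eta : Int) (disk : Int) (rates : List Int) : Int :=
  rates.foldl (fun d r => if PySem.Int.mod eta r = 0 then d - 1 else d) disk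

-- outer 'while disk > 0: eta += 1; <inner>'
def pvLoopA (fuel : Nat) (disk eta : Int) (rates : List Int) : Int :=
  match fuel with
  | 0 => eta
  | fuel + 1 =>
    if 0 < disk then pvLoopA fuel (pvInnerA (eta + 1) disk rates) (eta + 1) rates
    else eta

def calcExhaustion (disk : Int) (procRates : List Int) : Int :=
  pvLoopA (pvFuel disk procRates) disk 0 procRates

-- ===== PORT B =====
-- filled(t) = sum(t // abs(r) for r in procRates)
def pvFilled (rates : List Int) (t : Int) : Int :=
  rates.foldl (fun s r => s + PySem.Int.floordiv t |r|) 0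

-- fuel guard for B's doubling loop (never exhausted under Pre_)
def pvFuelB (disk : Int) (rates : List Int) : Nat :=
  (disk * rates.foldl (fun a r => max a |r|) 1).toNat + 1

-- 'while filled(hi) < disk: hi *= 2'  (fuel guard only; never exhausted under Pre_)
def pvGrow (fuel : Nat) (disk : Int) (rates : List Int) (hi : Int) : Int :=
  match fuel with
  | 0 => hi
  | fuel + 1 =>
    if pvFilled rates hi < disk then pvGrow fuel disk rates (hi * 2) else hi

-- 'while lo < hi: mid = (lo+hi)//2; ...'
def pvBsearch (disk : Int) (rates : List Int) (lo hi : Int) : Int :=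
  if h : lo < hi then
    if disk ≤ pvFilled rates (PySem.Int.floordiv (lo + hi) 2) then
      pvBsearch disk rates lo (PySem.Int.floordiv (lo + hi) 2)
    else
      pvBsearch disk rates (PySem.Int.floordiv (lo + hi) 2 + 1) hi
  else lo
termination_by (hi - lo).toNat
decreasing_by
  · have hb := PySem.Int.floordiv_two_mid_bounds (le_of_lt h)
    have hlt : PySem.Int.floordiv (lo + hi) 2 < hi := by
      rw [PySem.Int.floordiv_lt_iff_lt_mul (by norm_num)]; omega
    omega
  · have hb := PySem.Int.floordiv_two_mid_bounds (le_of_lt h)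
    omega

def calcExhaustion_alt (disk : Int) (procRates : List Int) : Int :=
  if disk ≤ 0 then 0
  else pvBsearch disk procRates 1 (pvGrow (pvFuelB disk procRates) disk procRates 1)

-- ===== PRECONDITION & SPEC =====
-- Pre_ excludes exactly the inputs on which A does not return: with disk > 0, A
-- raises ZeroDivisionError if 0 is among the rates and loops forever if the rate
-- list is empty (B behaves the same way there).
def Pre_calcExhaustion (disk : Int) (procRates : List Int) : Prop :=
  disk ≤ 0 ∨ (procRates ≠ [] ∧ ∀ r ∈ procRates, r ≠ 0)
instance (disk : Int) (procRates : List Int) : Decidable (Pre_calcExhaustion disk procRates) := by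
  unfold Pre_calcExhaustion; infer_instance

def pvWitness_calcExhaustion : Int × List Int := (5, [2, 3])

def Spec_calcExhaustion (disk : Int) (procRates : List Int) (out : Int) : Prop := out = calcExhaustion_alt disk procRates
instance (disk : Int) (procRates : List Int) (out : Int) : Decidable (Spec_calcExhaustion disk procRates out) := by unfold Spec_calcExhaustion; infer_instance

-- ===== CLAIM (what is proved, stated in full; the proofs are below) =====
def Claim_equal_calcExhaustion : Prop := ∀ (disk : Int) (procRates : List Int), Dom_calcExhaustion disk procRates → Pre_calcExhaustion disk procRates → Spec_calcExhaustion disk procRates (calcExhaustion disk procRates)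

-- ===== LEMMAS AND PROOFS =====

-- proof-side total-bytes function: S(t) = Σ_r t / |r| (Euclidean division; equal
-- to Python's // here since t ≥ 0 and |r| > 0)
def pvS (rates : List Int) (t : Int) : Int := (rates.map (fun r => t / |r|)).sum

theorem pvFilled_eq (rates : List Int) (t : Int) (hnz : ∀ r ∈ rates, r ≠ 0) :
    pvFilled rates t = pvS rates t := by
  unfold pvFilled pvS
  rw [PySem.List.foldl_add rates (fun r => PySem.Int.floordiv t |r|) 0, zero_add]
  exact congrArg List.sum (List.map_congr_left fun r hr =>
    PySem.Int.floordiv_eq_ediv_of_pos (abs_pos.mpr (hnz r hr)))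

theorem pvS_zero (rates : List Int) : pvS rates 0 = 0 := by
  unfold pvS
  induction rates with
  | nil => simp
  | cons r l ih => simp [ih]

theorem pvS_mono (rates : List Int) (hnz : ∀ r ∈ rates, r ≠ 0) {s t : Int}
    (hst : s ≤ t) : pvS rates s ≤ pvS rates t := by
  unfold pvS
  exact List.sum_le_sum fun r hr =>
    Int.ediv_le_ediv (abs_pos.mpr (hnz r hr)) hst

theorem pvS_succ_elem (r t : Int) (hr : r ≠ 0) (ht : 0 ≤ t) :
    (t + 1) / |r| = t / |r| + (if PySem.Int.mod (t + 1) r = 0 then 1 else 0) := by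
  obtain ⟨n, rfl⟩ := Int.eq_ofNat_of_zero_le ht
  obtain ⟨m, hm⟩ : ∃ m : Nat, |r| = (m : Int) :=
    ⟨r.natAbs, (Int.abs_eq_natAbs r).symm ▸ rfl⟩
  have hdvd : (PySem.Int.mod ((n : Int) + 1) r = 0) ↔ (m ∣ n + 1) := by
    rw [PySem.Int.mod_eq_zero_iff_dvd]
    constructor
    · intro h
      have : |r| ∣ (n : Int) + 1 := (abs_dvd r _).mpr h
      rw [hm] at this
      exact_mod_cast this
    · intro h
      have : |r| ∣ (n : Int) + 1 := by rw [hm]; exact_mod_cast h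
      exact (abs_dvd r _).mp this
  rw [hm]
  have hcast : ((n : Int) + 1) = ((n + 1 : Nat) : Int) := by push_cast; ring
  rw [hcast, ← Int.natCast_div, ← Int.natCast_div, Nat.succ_div]
  by_cases h : m ∣ n + 1
  · simp [h, hdvd.mpr h]
  · have hnot : ¬ PySem.Int.mod ((n : Int) + 1) r = 0 := fun hc => h (hdvd.mp hc)
    simp [h, hnot]

theorem pvS_succ (rates : List Int) (hnz : ∀ r ∈ rates, r ≠ 0) (t : Int) (ht : 0 ≤ t) :
    pvS rates (t + 1)
      = pvS rates t + (rates.countP (fun r => decide (PySem.Int.mod (t + 1) r = 0)) : Int) := by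
  induction rates with
  | nil => simp [pvS]
  | cons r l ih =>
    have hr : r ≠ 0 := hnz r (by simp)
    have hl : ∀ x ∈ l, x ≠ 0 := fun x hx => hnz x (by simp [hx])
    unfold pvS at *
    simp only [List.map_cons, List.sum_cons, List.countP_cons, ih hl]
    rw [pvS_succ_elem r t hr ht]
    by_cases h : PySem.Int.mod (t + 1) r = 0
    · simp [h]; push_cast; ring
    · simp [h]; ring

theorem pvInnerA_eq (e d : Int) (rates : List Int) :
    pvInnerA e d rates
      = d - (rates.countP (fun r => decide (PySem.Int.mod e r = 0)) : Int) := by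
  unfold pvInnerA
  induction rates generalizing d with
  | nil => simp
  | cons r l ih =>
    simp only [List.foldl_cons, List.countP_cons, ih]
    by_cases h : PySem.Int.mod e r = 0
    · simp [h]; push_cast; ring
    · simp [h]

-- A's loop reaches exactly the least T with pvS T ≥ disk0
theorem pvLoopA_reaches (rates : List Int) (disk0 : Int)
    (hnz : ∀ r ∈ rates, r ≠ 0) (T0 : Int)
    (hge : disk0 ≤ pvS rates T0)
    (hmin : ∀ t : Int, 0 ≤ t → t < T0 → pvS rates t < disk0) :
    ∀ (fuel : Nat) (e : Int), 0 ≤ e → e ≤ T0 → T0 ≤ e + fuel →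
      pvLoopA fuel (disk0 - pvS rates e) e rates = T0 := by
  intro fuel
  induction fuel with
  | zero => intro e he hle hfe; simp only [pvLoopA]; omega
  | succ fuel ih =>
    intro e he hle hfe
    by_cases heq : e = T0
    · have hSe : pvS rates e = pvS rates T0 := by rw [heq]
      have hnot : ¬ 0 < disk0 - pvS rates e := by omega
      simp only [pvLoopA, if_neg hnot]
      exact heq
    · have hlt : e < T0 := lt_of_le_of_ne hle heq
      have hpos : 0 < disk0 - pvS rates e := by
        have := hmin e he hlt; omega
      simp only [pvLoopA, hpos, if_true]
      rw [pvInnerA_eq, sub_sub, ← pvS_succ rates hnz e he]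
      exact ih (e + 1) (by omega) (by omega) (by omega)

theorem pvS_lower (rates : List Int) (hnz : ∀ r ∈ rates, r ≠ 0)
    (r0 : Int) (hr0 : r0 ∈ rates) (t : Int) (ht : 0 ≤ t) :
    t / |r0| ≤ pvS rates t := by
  unfold pvS
  exact List.single_le_sum
    (fun x hx => by
      obtain ⟨r, hr, rfl⟩ := List.mem_map.mp hx
      exact Int.ediv_nonneg ht (abs_nonneg r))
    _ (List.mem_map_of_mem hr0)

theorem pvGrow_ge (rates : List Int) (disk0 : Int)
    (hnz : ∀ r ∈ rates, r ≠ 0) (T0 : Int) (hT0 : 0 ≤ T0)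
    (hge : disk0 ≤ pvS rates T0)
    (hmin : ∀ t : Int, 0 ≤ t → t < T0 → pvS rates t < disk0) :
    ∀ (fuel : Nat) (hi : Int), 1 ≤ hi → T0 ≤ hi + fuel →
      T0 ≤ pvGrow fuel disk0 rates hi := by
  intro fuel
  induction fuel with
  | zero => intro hi h1 hf; simpa [pvGrow] using hf
  | succ fuel ih =>
    intro hi h1 hf
    by_cases h : pvFilled rates hi < disk0
    · simp only [pvGrow, h, if_true]
      exact ih (hi * 2) (by omega) (by omega)
    · simp only [pvGrow, h, if_false]
      by_contra hc
      push_neg at hc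
      have := hmin hi (by omega) hc
      rw [pvFilled_eq rates hi hnz] at h
      omega

theorem pvBsearch_eq (rates : List Int) (disk0 : Int)
    (hnz : ∀ r ∈ rates, r ≠ 0) (T0 : Int) (hT0 : 0 ≤ T0)
    (hge : disk0 ≤ pvS rates T0)
    (hmin : ∀ t : Int, 0 ≤ t → t < T0 → pvS rates t < disk0) :
    ∀ (n : Nat) (lo hi : Int), (hi - lo).toNat = n → 0 ≤ lo → lo ≤ T0 → T0 ≤ hi →
      pvBsearch disk0 rates lo hi = T0 := by
  intro n
  induction n using Nat.strong_induction_on with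
  | _ n ih =>
    intro lo hi hn h0 hlo hhi
    by_cases h : lo < hi
    · have hb := PySem.Int.floordiv_two_mid_bounds (le_of_lt h)
      have hltm : PySem.Int.floordiv (lo + hi) 2 < hi := by
        rw [PySem.Int.floordiv_lt_iff_lt_mul (by norm_num)]; omega
      rw [pvBsearch]
      simp only [h, dif_pos]
      by_cases hmid : disk0 ≤ pvFilled rates (PySem.Int.floordiv (lo + hi) 2)
      · simp only [hmid, if_true]
        have hTmid : T0 ≤ PySem.Int.floordiv (lo + hi) 2 := by
          by_contra hc
          push_neg at hc
          have := hmin _ (by omega) hc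
          rw [pvFilled_eq rates _ hnz] at hmid
          omega
        exact ih ((PySem.Int.floordiv (lo + hi) 2) - lo).toNat (by omega)
          lo _ rfl h0 hlo hTmid
      · simp only [hmid, if_false]
        have hTmid : PySem.Int.floordiv (lo + hi) 2 < T0 := by
          by_contra hc
          push_neg at hc
          have := pvS_mono rates hnz hc
          rw [pvFilled_eq rates _ hnz] at hmid
          omega
        exact ih (hi - (PySem.Int.floordiv (lo + hi) 2 + 1)).toNat (by omega)
          _ hi rfl (by omega) (by omega) hhi
    · rw [pvBsearch]
      simp only [h, dif_neg, not_false_iff]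
      omega

-- bounds for the fuel terms: every rate's |r| is at most M := foldl max 1, and M ≥ 1
theorem pvFoldMax_bounds (rates : List Int) :
    1 ≤ rates.foldl (fun a r => max a |r|) 1 ∧
      ∀ r ∈ rates, |r| ≤ rates.foldl (fun a r => max a |r|) 1 := by
  have h : rates.foldl (fun a r => max a |r|) 1
      = (rates.map (fun r => |r|)).foldl max 1 := by
    rw [List.foldl_map]
  rw [h]
  have hb := PySem.List.le_foldl_max (rates.map (fun r => |r|)) 1
  exact ⟨hb.1, fun r hr => hb.2 _ (List.mem_map_of_mem hr)⟩

-- ===== VERDICT (by name: the statement is the Claim_ definition above) =====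
theorem calcExhaustion_spec : Claim_equal_calcExhaustion := by
  intro disk rates _ hpre
  unfold Spec_calcExhaustion calcExhaustion calcExhaustion_alt pvFuel pvFuelB
  by_cases hd : disk ≤ 0
  · simp only [hd, if_true, pvLoopA, show ¬ 0 < disk by omega, if_false]
  · push_neg at hd
    obtain ⟨hne, hnz⟩ : rates ≠ [] ∧ ∀ r ∈ rates, r ≠ 0 := by
      rcases hpre with h | h
      · omega
      · exact h
    simp only [show ¬ disk ≤ 0 by omega, if_false]
    -- the maximum absolute rate M, and the a-priori bound disk * M on the answer
    set M := rates.foldl (fun a r => max a |r|) 1 with hM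
    obtain ⟨hM1, hMle⟩ := pvFoldMax_bounds rates
    rw [← hM] at hM1 hMle
    obtain ⟨r0, l, rfl⟩ := List.exists_cons_of_ne_nil hne
    have hr0 : (r0 : Int) ∈ r0 :: l := by simp
    have hbound : disk ≤ pvS (r0 :: l) (disk * M) := by
      have h1 : disk ≤ (disk * M) / |r0| := by
        rw [Int.le_ediv_iff_mul_le (abs_pos.mpr (hnz r0 hr0))]
        exact mul_le_mul_of_nonneg_left (hMle r0 hr0) (by omega)
      exact le_trans h1 (pvS_lower _ hnz r0 hr0 _ (by positivity))
    -- least T ≥ 0 with pvS T ≥ disk, via Nat.find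
    have hex : ∃ n : Nat, disk ≤ pvS (r0 :: l) n :=
      ⟨(disk * M).toNat, by
        rwa [Int.toNat_of_nonneg (by positivity)]⟩
    set N := Nat.find hex with hN
    set T0 : Int := (N : Int) with hT0def
    have hge : disk ≤ pvS (r0 :: l) T0 := Nat.find_spec hex
    have hmin : ∀ t : Int, 0 ≤ t → t < T0 → pvS (r0 :: l) t < disk := by
      intro t ht hlt
      have htn : (t.toNat : Int) = t := Int.toNat_of_nonneg ht
      have : t.toNat < N := by omega
      have := Nat.find_min hex this
      rw [htn] at this
      omega
    have hT0nonneg : 0 ≤ T0 := Int.natCast_nonneg N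
    have hT0pos : 0 < T0 := by
      by_contra hc
      have h0 : T0 = 0 := by omega
      rw [h0, pvS_zero] at hge
      omega
    have hT0bound : T0 ≤ disk * M := by
      by_contra hc
      push_neg at hc
      have := hmin (disk * M) (by positivity) hc
      omega
    have hfuel : T0 ≤ (0 : Int) + ((disk * M).toNat + 1 : Nat) := by
      push_cast
      rw [Int.toNat_of_nonneg (by positivity)]
      omega
    -- A side
    have hA : pvLoopA ((disk * M).toNat + 1) disk 0 (r0 :: l) = T0 := by
      have h0 := pvLoopA_reaches (r0 :: l) disk hnz T0 hge hmin
        ((disk * M).toNat + 1) 0 le_rfl (by omega) (by exact_mod_cast hfuel)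
      rwa [pvS_zero, sub_zero] at h0
    -- B side
    have hgrow : T0 ≤ pvGrow ((disk * M).toNat + 1) disk (r0 :: l) 1 :=
      pvGrow_ge (r0 :: l) disk hnz T0 (by omega) hge hmin _ 1 le_rfl
        (by push_cast at hfuel ⊢; omega)
    have hB : pvBsearch disk (r0 :: l) 1 (pvGrow ((disk * M).toNat + 1) disk (r0 :: l) 1) = T0 :=
      pvBsearch_eq (r0 :: l) disk hnz T0 (by omega) hge hmin _ 1 _ rfl
        (by omega) (by omega) hgrow
    rw [hA, hB]
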